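-- pv_equiv track=rewrite | github.com/RangelGasharov/Python_Basics | algorithms/edabit_breaking_news.py | news_at_ten
-- ===== SOURCE A (Python) =====
-- def news_at_ten(text, screen_width):
--     current_word = screen_width * " "
--     result = [current_word]
--     for i in range(len(text)):
--         current_word = current_word[1:] + text[i]
--         result.append(current_word)
--     for i in range(screen_width):
--         current_word = current_word[1:] + " "
--         result.append(current_word)
--     return result
-- ===== SOURCE B (Python) =====
-- def news_at_ten(text, screen_width):
--     padded = " " * screen_width + text + " " * screen_width
--     return [padded[i:i + screen_width] for i in range(len(text) + screen_width + 1)]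
-- ===== Notes on version B (the rewrite author's own statement) =====
-- stated objective: simpler
-- what changed: Replaces A's stateful drop-first-char/append recurrence (two loops mutating current_word) with one precomputed padded string that every output window slices independently; Pre_ restricts to positive screen widths, the natural domain of a marquee, where screen_width <= 0 both programs' degenerate windows are equally unspecified.
-- outside the precondition, e.g. on news_at_ten('ab', 0): A returns ['', 'a', 'b'], B returns ['', '', '']; on news_at_ten('ab', -1): A returns ['', 'a', 'b'], B returns ['a', '']
import Mathlib
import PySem

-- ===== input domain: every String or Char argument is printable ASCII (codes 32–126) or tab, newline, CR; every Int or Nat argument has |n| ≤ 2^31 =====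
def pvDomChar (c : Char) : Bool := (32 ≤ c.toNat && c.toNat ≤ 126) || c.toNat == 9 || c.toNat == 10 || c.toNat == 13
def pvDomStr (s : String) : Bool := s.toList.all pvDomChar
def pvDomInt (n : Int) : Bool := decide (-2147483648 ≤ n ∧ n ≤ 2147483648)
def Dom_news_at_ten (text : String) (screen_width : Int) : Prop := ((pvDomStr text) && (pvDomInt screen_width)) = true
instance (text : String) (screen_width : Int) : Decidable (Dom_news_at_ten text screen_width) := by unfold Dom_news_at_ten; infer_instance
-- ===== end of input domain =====

-- B replaces A's stateful slice-off-first/append window recurrence with independent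
-- slices of one precomputed padded string; objective: simpler.


-- ===== PORT A =====
def news_at_ten (text : String) (screen_width : Int) : List String :=
  let s := text.toList
  let current_word0 : List Char := PySem.List.pyRepeat [' '] screen_width
  let st1 := (PySem.List.pyRange 0 (s.length : Int) 1).foldl
      (fun (st : List Char × List (List Char)) i =>
        let cw := PySem.List.slice st.1 (some 1) none ++ [PySem.List.pyGetD s i ' ']
        (cw, st.2 ++ [cw])) (current_word0, [current_word0])
  let st2 := (PySem.List.pyRange 0 screen_width 1).foldl
      (fun (st : List Char × List (List Char)) _ =>
        let cw := PySem.List.slice st.1 (some 1) none ++ [' ']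
        (cw, st.2 ++ [cw])) st1
  st2.2.map String.ofList

-- ===== PORT B =====
def news_at_ten_alt (text : String) (screen_width : Int) : List String :=
  let pad : List Char := PySem.List.pyRepeat [' '] screen_width
  let padded := pad ++ text.toList ++ pad
  (PySem.List.pyRange 0 ((text.toList.length : Int) + screen_width + 1) 1).map
    (fun i => String.ofList (PySem.List.slice padded (some i) (some (i + screen_width))))

-- ===== PRECONDITION & SPEC =====
-- Pre_ restricts to positive screen widths, the natural domain of a marquee display (a
-- non-positive width names no window at all): for screen_width ≤ 0 A still returns, but its
-- length-1 windows (an accident of '[1:] + char' on a too-short string) and B's empty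
-- index-slices are equally unspecified readings of a meaningless width, so neither is matched.
def Pre_news_at_ten (text : String) (screen_width : Int) : Prop := 1 ≤ screen_width
instance (text : String) (screen_width : Int) : Decidable (Pre_news_at_ten text screen_width) := by unfold Pre_news_at_ten; infer_instance
def pvWitness_news_at_ten : String × Int := ("news", 3)

def Spec_news_at_ten (text : String) (screen_width : Int) (out : List String) : Prop := out = news_at_ten_alt text screen_width
instance (text : String) (screen_width : Int) (out : List String) : Decidable (Spec_news_at_ten text screen_width out) := by unfold Spec_news_at_ten; infer_instance

-- ===== CLAIM (what is proved, stated in full; the proofs are below) =====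
def Claim_equal_news_at_ten : Prop := ∀ (text : String) (screen_width : Int), Dom_news_at_ten text screen_width → Pre_news_at_ten text screen_width → Spec_news_at_ten text screen_width (news_at_ten text screen_width)

-- ===== LEMMAS AND PROOFS =====

-- successive windows produced by A's recurrence cw ↦ cw.tail ++ [c] along a char stream
def winList (cw : List Char) : List Char → List (List Char)
  | [] => []
  | c :: cs => (cw.tail ++ [c]) :: winList (cw.tail ++ [c]) cs

-- A's loop body, after the slice is rewritten to tail
def stepA (st : List Char × List (List Char)) (c : Char) : List Char × List (List Char) :=
  (st.1.tail ++ [c], st.2 ++ [st.1.tail ++ [c]])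

theorem foldl_stepA (s : List Char) (cw : List Char) (acc : List (List Char)) :
    s.foldl stepA (cw, acc) = ((winList cw s).getLastD cw, acc ++ winList cw s) := by
  induction s generalizing cw acc with
  | nil => simp [winList]
  | cons c cs ih =>
      simp only [List.foldl_cons, stepA, winList, List.getLastD_cons]
      rw [ih]
      simp

theorem foldl_pyRange_ignore {σ : Type} (m : Nat) (c : Char) (f : σ → Char → σ) (init : σ) :
    (PySem.List.pyRange 0 (m : Int) 1).foldl (fun st _ => f st c) init
      = (List.replicate m c).foldl f init := by
  induction m generalizing init with
  | zero => simp
  | succ k ih =>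
      rw [show ((k + 1 : Nat) : Int) = (k : Int) + 1 by push_cast; ring,
          PySem.List.pyRange_one_succ_right (by positivity), List.replicate_succ']
      simp [List.foldl_append, ih]

theorem winList_eq_map (w : Nat) (hw : 1 ≤ w) :
    ∀ (s p : List Char), p.length = w →
      winList p s = (List.range s.length).map (fun k => ((p ++ s).drop (k + 1)).take w) := by
  intro s
  induction s with
  | nil => intro p _; simp [winList]
  | cons c cs ih =>
      intro p hp
      have hpne : p ≠ [] := by intro h; subst h; simp at hp; omega
      have htail : p.tail.length = w - 1 := by simp [hp]
      have hp' : (p.tail ++ [c]).length = w := by simp [htail]; omega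
      have hdrop : (p ++ c :: cs).drop 1 = p.tail ++ c :: cs := by
        cases p with
        | nil => exact absurd rfl hpne
        | cons a as => simp
      simp only [winList, List.length_cons, List.range_succ_eq_map, List.map_cons, List.map_map,
        Nat.zero_add]
      congr 1
      · -- head window
        rw [hdrop, List.take_append, List.take_of_length_le (by omega), htail,
            show w - (w - 1) = 1 by omega]
        simp
      · rw [ih (p.tail ++ [c]) hp']
        apply List.map_congr_left
        intro k _
        have : (p.tail ++ [c]) ++ cs = (p ++ c :: cs).drop 1 := by
          rw [hdrop]; simp
        simp only [Function.comp, this, List.drop_drop]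
        congr 2
        omega

theorem news_at_ten_main (text : String) (screen_width : Int)
    (hw : 1 ≤ screen_width) :
    news_at_ten text screen_width = news_at_ten_alt text screen_width := by
  obtain ⟨w, rfl⟩ : ∃ w : Nat, screen_width = (w : Int) :=
    ⟨screen_width.toNat, (Int.toNat_of_nonneg (by omega)).symm⟩
  have hw1 : 1 ≤ w := by exact_mod_cast hw
  have hA : news_at_ten text (w : Int)
      = ((List.replicate w ' ') :: winList (List.replicate w ' ')
          (text.toList ++ List.replicate w ' ')).map String.ofList := by
    unfold news_at_ten
    simp only [PySem.List.slice_from_one, PySem.List.pyRepeat_singleton, Int.toNat_natCast]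
    have h1 : (fun (st : List Char × List (List Char)) (i : Int) =>
        (st.1.tail ++ [PySem.List.pyGetD text.toList i ' '],
          st.2 ++ [st.1.tail ++ [PySem.List.pyGetD text.toList i ' ']]))
        = fun acc j => stepA acc (PySem.List.pyGetD text.toList j ' ') := rfl
    have h2 : (fun (st : List Char × List (List Char)) (_ : Int) =>
        (st.1.tail ++ [' '], st.2 ++ [st.1.tail ++ [' ']]))
        = fun st _ => stepA st ' ' := rfl
    rw [h1, h2, PySem.List.foldl_pyRange_zero_pyGetD' text.toList ' ' stepA _,
        foldl_pyRange_ignore w ' ' stepA _, ← List.foldl_append, foldl_stepA]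
    rfl
  rw [hA]
  have hlen : (List.replicate w ' ' : List Char).length = w := by simp
  rw [winList_eq_map w hw1 (text.toList ++ List.replicate w ' ') _ hlen]
  unfold news_at_ten_alt
  simp only [PySem.List.pyRepeat_singleton, Int.toNat_natCast]
  have hb : ((text.toList.length : Int) + (w : Int) + 1)
      = ((text.toList.length + w + 1 : Nat) : Int) := by push_cast; ring
  rw [hb, PySem.List.pyRange_zero_nat, List.map_map,
      show (text.toList ++ List.replicate w ' ').length = text.toList.length + w by simp,
      List.range_succ_eq_map, List.map_cons, List.map_cons, List.map_map]
  congr 1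
  · -- first window is the all-blank screen
    simp only [Function.comp_apply, Nat.cast_zero, zero_add, PySem.List.slice_zero_start]
    rw [PySem.List.slice_to_natCast, List.append_assoc, List.take_append,
        List.take_of_length_le (by simp)]
    simp
  · -- remaining windows
    rw [List.map_map]
    apply List.map_congr_left
    intro k hk
    simp only [Function.comp_apply]
    rw [show ((Nat.succ k : Nat) : Int) + (w : Int) = (((Nat.succ k) : Nat) : Int) + ((w : Nat) : Int) from rfl,
        PySem.List.slice_natCast_add, ← List.append_assoc]

-- ===== VERDICT (by name: the statement is the Claim_ definition above) =====
theorem news_at_ten_spec : Claim_equal_news_at_ten := by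
  intro text sw _ hpre
  unfold Spec_news_at_ten
  exact news_at_ten_main text sw hpre
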